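-- pv_equiv track=rewrite | github.com/pypi-data/pypi-mirror-277 | packages/GESS/gess-0.1.1.tar.gz/gess-0.1.1/src/GESS/GESS_core.py | recursive_checkback
-- ===== SOURCE A (Python) =====
-- def recursive_checkback(vector, position_checked):
--
--     current_position = position_checked
--     current_enrichment = vector[current_position]
--
--     next_position = position_checked +1
--
--     if next_position <= len(vector)-1:
--         next_enrichment = vector[next_position]
--
--         if next_enrichment == current_enrichment and next_position <= len(vector)-1:
--
--             current_position = recursive_checkback(vector, next_position)
--
--         elif next_enrichment == current_enrichment:
--             current_position = next_position
--
--     return current_position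
-- ===== SOURCE B (Python) =====
-- def recursive_checkback(vector, position_checked):
--     cur = vector[position_checked]
--     pos = position_checked
--     while pos + 1 <= len(vector) - 1 and vector[pos + 1] == cur:
--         cur = vector[pos + 1]
--         pos += 1
--     return pos
-- ===== Notes on version B (the rewrite author's own statement) =====
-- stated objective: simpler
-- what changed: Replaces the tail recursion with an explicit iterative while-loop walking forward over the run of equal values, dropping the unreachable elif branch.
import Mathlib
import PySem

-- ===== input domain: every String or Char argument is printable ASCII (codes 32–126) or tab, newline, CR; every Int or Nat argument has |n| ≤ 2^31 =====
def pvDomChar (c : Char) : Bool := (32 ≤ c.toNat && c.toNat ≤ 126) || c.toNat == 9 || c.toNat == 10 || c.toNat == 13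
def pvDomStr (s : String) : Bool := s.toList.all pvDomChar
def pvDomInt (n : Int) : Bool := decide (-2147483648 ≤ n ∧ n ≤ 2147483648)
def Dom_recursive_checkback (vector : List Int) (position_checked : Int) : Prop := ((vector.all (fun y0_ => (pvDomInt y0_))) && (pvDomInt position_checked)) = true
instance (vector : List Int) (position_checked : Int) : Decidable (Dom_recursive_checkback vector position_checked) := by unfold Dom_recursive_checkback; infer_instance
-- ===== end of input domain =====

-- B replaces A's tail recursion with an explicit iterative forward walk (simpler; same cost).

-- ===== PORT A =====
-- Literal port of A's recursion. vector[i] is PySem.List.pyGet?; IndexError (none) inputs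
-- are excluded by Pre_; the port returns 0 there.
def recursive_checkback (vector : List Int) (position_checked : Int) : Int :=
  match PySem.List.pyGet? vector position_checked with
  | none => 0  -- IndexError; excluded by Pre_
  | some current_enrichment =>
    let next_position := position_checked + 1
    if _h : next_position ≤ PySem.List.len vector - 1 then
      match PySem.List.pyGet? vector next_position with
      | none => 0  -- IndexError; unreachable under Pre_
      | some next_enrichment =>
        if next_enrichment = current_enrichment ∧ next_position ≤ PySem.List.len vector - 1 then
          recursive_checkback vector next_position
        else if next_enrichment = current_enrichment then
          next_position
        else
          position_checked
    else position_checked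
termination_by ((PySem.List.len vector) - position_checked).toNat
decreasing_by simp [PySem.List.len_eq] at _h ⊢; omega

-- ===== PORT B =====
-- The while-loop of Source B: state (cur, pos), walk forward while the next element equals cur.
def rcWalk (vector : List Int) (cur : Int) (pos : Int) : Int :=
  if _h : pos + 1 ≤ PySem.List.len vector - 1 then
    match PySem.List.pyGet? vector (pos + 1) with
    | none => pos  -- IndexError in Python; unreachable under Pre_
    | some v =>
      if v = cur then rcWalk vector v (pos + 1) else pos
  else pos
termination_by ((PySem.List.len vector) - pos).toNat
decreasing_by simp [PySem.List.len_eq] at _h ⊢; omega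

def recursive_checkback_alt (vector : List Int) (position_checked : Int) : Int :=
  match PySem.List.pyGet? vector position_checked with
  | none => 0  -- IndexError; excluded by Pre_
  | some cur => rcWalk vector cur position_checked

-- ===== PRECONDITION & SPEC =====
-- Pre_ excludes exactly the inputs where Python A raises IndexError: the start index out of range.
def Pre_recursive_checkback (vector : List Int) (position_checked : Int) : Prop :=
  PySem.Raise.InRange vector.length position_checked
instance (vector : List Int) (position_checked : Int) : Decidable (Pre_recursive_checkback vector position_checked) := by unfold Pre_recursive_checkback; infer_instance

def pvWitness_recursive_checkback : List Int × Int := ([3, 3, 3, 5], 1)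

def Spec_recursive_checkback (vector : List Int) (position_checked : Int) (out : Int) : Prop := out = recursive_checkback_alt vector position_checked
instance (vector : List Int) (position_checked : Int) (out : Int) : Decidable (Spec_recursive_checkback vector position_checked out) := by unfold Spec_recursive_checkback; infer_instance

-- ===== CLAIM (what is proved, stated in full; the proofs are below) =====
def Claim_equal_recursive_checkback : Prop := ∀ (vector : List Int) (position_checked : Int), Dom_recursive_checkback vector position_checked → Pre_recursive_checkback vector position_checked → Spec_recursive_checkback vector position_checked (recursive_checkback vector position_checked)

-- ===== LEMMAS AND PROOFS =====

-- A's recursion equals B's walk seeded with the element at the start position.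
theorem rc_eq_walk (vector : List Int) (position_checked cur : Int)
    (hget : PySem.List.pyGet? vector position_checked = some cur) :
    recursive_checkback vector position_checked = rcWalk vector cur position_checked := by
  rw [recursive_checkback, rcWalk, hget]
  dsimp only
  by_cases h : position_checked + 1 ≤ PySem.List.len vector - 1
  · rw [dif_pos h, dif_pos h]
    cases hnext : PySem.List.pyGet? vector (position_checked + 1) with
    | none =>
      -- contradiction: position_checked is in range (hget) and p+1 ≤ len-1, so p+1 is in range
      have hin : PySem.Raise.InRange vector.length position_checked := by
        by_contra hc
        rw [← PySem.List.pyGet?_eq_none_iff] at hc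
        simp [hc] at hget
      have hout := (PySem.List.pyGet?_eq_none_iff vector (position_checked + 1)).mp hnext
      simp [PySem.Raise.InRange, PySem.List.len_eq] at hin hout h
      omega
    | some v =>
      by_cases hv : v = cur
      · simp only [hv, h, and_true, if_true]
        exact rc_eq_walk vector (position_checked + 1) cur (hv ▸ hnext)
      · simp [hv]
  · rw [dif_neg h, dif_neg h]
termination_by ((PySem.List.len vector) - position_checked).toNat
decreasing_by simp only [PySem.List.len_eq] at *; omega

-- ===== VERDICT (by name: the statement is the Claim_ definition above) =====
theorem recursive_checkback_spec : Claim_equal_recursive_checkback := by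
  intro vector position_checked _ hpre
  unfold Spec_recursive_checkback recursive_checkback_alt
  cases hget : PySem.List.pyGet? vector position_checked with
  | none =>
    exact absurd hpre (by simpa [PySem.List.pyGet?_eq_none_iff] using hget)
  | some cur => exact rc_eq_walk vector position_checked cur hget
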